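-- pv_equiv track=rewrite | github.com/KazukiNoSuzaku/Leetcode | Python/1958_Check_if_Move_is_Legal.py | checkMove
-- ===== SOURCE A (Python) =====
-- def checkMove(board, rMove, cMove, color):
--     """
--     :type board: List[List[str]]
--     :type rMove: int
--     :type cMove: int
--     :type color: str
--     :rtype: bool
--     """
--     directions = [(-1, -1), (-1, 0), (-1, 1), (0, -1), (0, 1), (1, -1), (1, 0), (1, 1)]
--     for dr, dc in directions:
--         r, c = rMove + dr, cMove + dc
--         length = 1
--         while 0 <= r < 8 and 0 <= c < 8:
--             if board[r][c] == '.':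
--                 break
--             if board[r][c] == color:
--                 if length >= 2:
--                     return True
--                 break
--             r += dr
--             c += dc
--             length += 1
--     return False
-- ===== SOURCE B (Python) =====
-- def checkMove(board, rMove, cMove, color):
--     for dr in (-1, 0, 1):
--         for dc in (-1, 0, 1):
--             if dr == 0 and dc == 0:
--                 continue
--             # pass 1: collect the ray of cells from the neighbour out to the edge
--             ray = []
--             r, c = rMove + dr, cMove + dc
--             while 0 <= r < 8 and 0 <= c < 8:
--                 ray.append(board[r][c])
--                 r += dr
--                 c += dc
--             # pass 2: length of the leading run of cells that are neither '.' nor color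
--             run = 0
--             while run < len(ray) and ray[run] != '.' and ray[run] != color:
--                 run += 1
--             if run >= 1 and run < len(ray) and ray[run] == color and color != '.':
--                 return True
--     return False
-- ===== Notes on version B (the rewrite author's own statement) =====
-- stated objective: alternative
-- what changed: Per direction B first collects the whole in-bounds ray into a list and then, in a separate pass, measures the leading run of non-dot non-color cells and checks the cell after the run, replacing A's single fused walk with a running length counter; directions come from nested dr/dc loops instead of a literal list.
import Mathlib
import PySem

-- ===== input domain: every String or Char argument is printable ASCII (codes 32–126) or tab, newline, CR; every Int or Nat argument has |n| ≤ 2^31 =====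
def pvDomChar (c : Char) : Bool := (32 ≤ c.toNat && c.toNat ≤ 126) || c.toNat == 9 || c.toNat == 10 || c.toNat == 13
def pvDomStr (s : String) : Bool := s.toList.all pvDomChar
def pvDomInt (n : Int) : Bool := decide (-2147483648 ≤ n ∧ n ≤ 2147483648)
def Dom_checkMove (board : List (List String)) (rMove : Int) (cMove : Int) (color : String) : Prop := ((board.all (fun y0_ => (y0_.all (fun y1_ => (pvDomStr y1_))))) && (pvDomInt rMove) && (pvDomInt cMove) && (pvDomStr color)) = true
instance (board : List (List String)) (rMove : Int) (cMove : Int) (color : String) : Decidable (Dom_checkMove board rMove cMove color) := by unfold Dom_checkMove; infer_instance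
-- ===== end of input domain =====

-- B replaces A's fused walk-with-counter by a two-pass judge per direction (collect the ray,
-- then scan its leading run); same value on every (at least) 8×8 board.

-- ===== PORT A =====
-- board[r][c]; Pre_ guarantees the indices hit existing rows/cells whenever 0 ≤ r,c < 8,
-- so the getD defaults are never reached under Pre_.
def get2 (board : List (List String)) (r c : Int) : String :=
  (PySem.List.pyGet? ((PySem.List.pyGet? board r).getD []) c).getD ""

-- the while loop of A; fuel 8 bounds the walk (each step moves ±1 in some coordinate inside [0,8))
def goA (board : List (List String)) (color : String) (dr dc : Int) : Nat → Int → Int → Int → Bool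
  | 0, _, _, _ => false
  | fuel+1, r, c, length =>
    if 0 ≤ r ∧ r < 8 ∧ 0 ≤ c ∧ c < 8 then
      if get2 board r c = "." then false
      else if get2 board r c = color then decide (2 ≤ length)
      else goA board color dr dc fuel (r + dr) (c + dc) (length + 1)
    else false

def checkMove (board : List (List String)) (rMove : Int) (cMove : Int) (color : String) : Bool :=
  ([(-1, -1), (-1, 0), (-1, 1), (0, -1), (0, 1), (1, -1), (1, 0), (1, 1)] : List (Int × Int)).any
    (fun d => goA board color d.1 d.2 8 (rMove + d.1) (cMove + d.2) 1)

-- ===== PORT B =====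
-- pass 1: the ray of cells from (r,c) out to the board edge (same fuel bound as A's walk)
def rayB (board : List (List String)) (dr dc : Int) : Nat → Int → Int → List String
  | 0, _, _ => []
  | fuel+1, r, c =>
    if 0 ≤ r ∧ r < 8 ∧ 0 ≤ c ∧ c < 8 then
      get2 board r c :: rayB board dr dc fuel (r + dr) (c + dc)
    else []

-- pass 2: the while loop counting the leading run of non-dot non-color cells
def runLen (color : String) : List String → Nat
  | [] => 0
  | x :: xs => if x ≠ "." ∧ x ≠ color then runLen color xs + 1 else 0

-- 'run >= 1 and run < len(ray) and ray[run] == color and color != "."'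
def judgeB (color : String) (ray : List String) : Bool :=
  decide (1 ≤ runLen color ray) &&
  decide ((ray.drop (runLen color ray)).head? = some color) &&
  decide (color ≠ ".")

def checkMove_alt (board : List (List String)) (rMove : Int) (cMove : Int) (color : String) : Bool :=
  ([-1, 0, 1] : List Int).any (fun dr =>
    ([-1, 0, 1] : List Int).any (fun dc =>
      if dr = 0 ∧ dc = 0 then false
      else judgeB color (rayB board dr dc 8 (rMove + dr) (cMove + dc))))

-- ===== PRECONDITION & SPEC =====
-- Pre_ excludes boards smaller than 8×8 (in the first 8 rows/columns) when some neighbour of the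
-- move lies on the 8×8 grid: there A indexes board[r][c] and may raise IndexError, and on the few
-- such boards where A's early '.'/color breaks avoid a missing cell, B's full ray may reach one
-- and raise. If every neighbour is off the grid (rMove or cMove outside [-1,8]) nothing is indexed.
def Pre_checkMove (board : List (List String)) (rMove : Int) (cMove : Int) (color : String) : Prop :=
  (8 ≤ board.length ∧ ∀ row ∈ board.take 8, 8 ≤ row.length) ∨
    rMove < -1 ∨ 8 < rMove ∨ cMove < -1 ∨ 8 < cMove
instance (board : List (List String)) (rMove : Int) (cMove : Int) (color : String) : Decidable (Pre_checkMove board rMove cMove color) := by unfold Pre_checkMove; infer_instance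

def pvWitness_checkMove : List (List String) × Int × Int × String :=
  ([[".", ".", ".", ".", ".", ".", ".", "."],
    [".", "B", "B", "B", "W", ".", ".", "."],
    [".", ".", ".", ".", ".", ".", ".", "."],
    [".", ".", ".", ".", ".", ".", ".", "."],
    [".", ".", ".", ".", ".", ".", ".", "."],
    [".", ".", ".", ".", ".", ".", ".", "."],
    [".", ".", ".", ".", ".", ".", ".", "."],
    [".", ".", ".", ".", ".", ".", ".", "."]], 1, 0, "W")

def Spec_checkMove (board : List (List String)) (rMove : Int) (cMove : Int) (color : String) (out : Bool) : Prop := out = checkMove_alt board rMove cMove color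
instance (board : List (List String)) (rMove : Int) (cMove : Int) (color : String) (out : Bool) : Decidable (Spec_checkMove board rMove cMove color out) := by unfold Spec_checkMove; infer_instance

-- ===== CLAIM (what is proved, stated in full; the proofs are below) =====
def Claim_equal_checkMove : Prop := ∀ (board : List (List String)) (rMove : Int) (cMove : Int) (color : String), Dom_checkMove board rMove cMove color → Pre_checkMove board rMove cMove color → Spec_checkMove board rMove cMove color (checkMove board rMove cMove color)

-- ===== LEMMAS AND PROOFS =====

-- A's walk with counter ℓ equals the two-pass judgement of the collected ray,
-- with the counter folded into the threshold.
lemma goA_eq (board : List (List String)) (color : String) (dr dc : Int) :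
    ∀ (fuel : Nat) (r c ℓ : Int),
      goA board color dr dc fuel r c ℓ =
        (decide (2 ≤ ℓ + (runLen color (rayB board dr dc fuel r c) : Int)) &&
         decide (((rayB board dr dc fuel r c).drop
                    (runLen color (rayB board dr dc fuel r c))).head? = some color) &&
         decide (color ≠ ".")) := by
  intro fuel
  induction fuel with
  | zero => intro r c ℓ; simp [goA, rayB]
  | succ n ih =>
    intro r c ℓ
    by_cases h : 0 ≤ r ∧ r < 8 ∧ 0 ≤ c ∧ c < 8
    · by_cases hdot : get2 board r c = "."
      · by_cases hc : color = "."
        · simp [goA, rayB, runLen, h, hdot, hc]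
        · simp [goA, rayB, runLen, h, hdot, hc, Ne.symm hc]
      · by_cases hcol : get2 board r c = color
        · have hcd : color ≠ "." := fun e => hdot (hcol.trans e)
          simp only [goA, rayB, runLen, if_pos h, if_neg hdot, if_pos hcol]
          simp [hcol, hcd]
        · have hrun : runLen color (get2 board r c :: rayB board dr dc n (r + dr) (c + dc)) =
              runLen color (rayB board dr dc n (r + dr) (c + dc)) + 1 := by
            simp [runLen, hdot, hcol]
          simp only [goA, rayB, if_pos h, if_neg hdot, if_neg hcol,
            ih (r + dr) (c + dc) (ℓ + 1), hrun, List.drop_succ_cons]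
          congr 2
          rw [decide_eq_decide]
          push_cast
          omega
    · simp [goA, rayB, h]

lemma goA_one (board : List (List String)) (color : String) (dr dc r c : Int) :
    goA board color dr dc 8 r c 1 = judgeB color (rayB board dr dc 8 r c) := by
  rw [goA_eq]
  unfold judgeB
  congr 1
  congr 1
  rw [decide_eq_decide]
  omega

-- ===== VERDICT (by name: the statement is the Claim_ definition above) =====
theorem checkMove_spec : Claim_equal_checkMove := by
  intro board rMove cMove color _ _
  show checkMove board rMove cMove color = checkMove_alt board rMove cMove color
  simp only [checkMove, checkMove_alt, List.any_cons, List.any_nil, goA_one]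
  norm_num
  ac_rfl
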